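-- pv_equiv track=rewrite | github.com/dav-ell/FaceNet | fbcrawler.py | split_dict_equally
-- ===== SOURCE A (Python) =====
-- def split_dict_equally(input_dict, chunks=2):
--     "Splits dict by keys. Returns a list of dictionaries."
--     # prep with empty dicts
--     return_list = [dict() for _ in range(chunks)]
--     idx = 0
--     for k, v in input_dict.items():
--         return_list[idx][k] = v
--         if idx < chunks - 1:  # indexes start at 0
--             idx += 1
--         else:
--             idx = 0
--     return return_list
-- ===== SOURCE B (Python) =====
-- def split_dict_equally(input_dict, chunks=2):
--     "Splits dict by keys. Returns a list of dictionaries."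
--     items = list(input_dict.items())
--     return [dict(kv for i, kv in enumerate(items) if i % chunks == j)
--             for j in range(chunks)]
-- ===== Notes on version B (the rewrite author's own statement) =====
-- stated objective: idiomatic
-- what changed: A fills the buckets in one pass driven by a mutable wrap-around counter; B materialises the items once and builds each bucket independently by a comprehension selecting the indices congruent to the bucket number mod chunks.
-- outside the precondition, e.g. on split_dict_equally({'a': 1}, 0): A raises IndexError, B returns []
import Mathlib
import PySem

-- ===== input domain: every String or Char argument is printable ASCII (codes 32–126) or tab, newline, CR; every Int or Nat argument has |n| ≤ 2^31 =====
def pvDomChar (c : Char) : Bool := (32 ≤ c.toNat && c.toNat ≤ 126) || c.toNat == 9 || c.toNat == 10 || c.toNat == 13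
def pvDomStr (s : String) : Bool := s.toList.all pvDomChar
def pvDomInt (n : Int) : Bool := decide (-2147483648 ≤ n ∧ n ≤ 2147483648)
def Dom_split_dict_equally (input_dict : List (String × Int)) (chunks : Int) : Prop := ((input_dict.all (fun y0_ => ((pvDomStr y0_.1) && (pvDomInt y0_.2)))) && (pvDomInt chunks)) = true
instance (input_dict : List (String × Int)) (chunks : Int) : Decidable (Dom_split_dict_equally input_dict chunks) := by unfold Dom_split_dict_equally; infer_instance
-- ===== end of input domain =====

-- B replaces A's single counter-driven mutating pass with one independent
-- index-filtering pass per chunk (same cost class; objective: idiomatic).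


-- ===== PORT A =====
-- return_list = [dict() for _ in range(chunks)]; one pass, idx wraps below chunks-1.
-- return_list[idx][k] = v is List.modify at idx (idx is provably in range under Pre_).
def split_dict_equally (input_dict : List (String × Int)) (chunks : Int) : List (List (String × Int)) :=
  let return_list : List (PySem.Dict String Int) :=
    (PySem.List.pyRange 0 chunks 1).map (fun _ => PySem.Dict.empty)
  let final := input_dict.foldl
    (fun (st : List (PySem.Dict String Int) × Int) kv =>
      (st.1.modify st.2.toNat (fun d => d.insert kv.1 kv.2),
       if st.2 < chunks - 1 then st.2 + 1 else 0))
    (return_list, 0)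
  final.1.map PySem.Dict.items

-- ===== PORT B =====
-- items = list(input_dict.items()); per chunk j, dict(kv for i,kv in enumerate(items) if i % chunks == j).
def split_dict_equally_alt (input_dict : List (String × Int)) (chunks : Int) : List (List (String × Int)) :=
  let items := input_dict
  (PySem.List.pyRange 0 chunks 1).map (fun j =>
    (((PySem.List.enumerate items).filter (fun p => PySem.Int.mod p.1 chunks == j)).foldl
        (fun (d : PySem.Dict String Int) p => d.insert p.2.1 p.2.2) PySem.Dict.empty).items)

-- ===== PRECONDITION & SPEC =====
-- Pre_ excludes (a) chunks <= 0 with a non-empty dict, where the Python A raises IndexError,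
-- and (b) association lists with duplicate keys, which do not represent a Python dict
-- (dict construction would collapse them before A ever runs).
def Pre_split_dict_equally (input_dict : List (String × Int)) (chunks : Int) : Prop :=
  (input_dict.map Prod.fst).Nodup ∧ (1 ≤ chunks ∨ input_dict = [])
instance (input_dict : List (String × Int)) (chunks : Int) : Decidable (Pre_split_dict_equally input_dict chunks) := by unfold Pre_split_dict_equally; infer_instance
def pvWitness_split_dict_equally : (List (String × Int)) × Int := ([("a", 1), ("b", 2), ("c", 3)], 2)

def Spec_split_dict_equally (input_dict : List (String × Int)) (chunks : Int) (out : List (List (String × Int))) : Prop := out = split_dict_equally_alt input_dict chunks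
instance (input_dict : List (String × Int)) (chunks : Int) (out : List (List (String × Int))) : Decidable (Spec_split_dict_equally input_dict chunks out) := by unfold Spec_split_dict_equally; infer_instance

-- ===== CLAIM (what is proved, stated in full; the proofs are below) =====
def Claim_equal_split_dict_equally : Prop := ∀ (input_dict : List (String × Int)) (chunks : Int), Dom_split_dict_equally input_dict chunks → Pre_split_dict_equally input_dict chunks → Spec_split_dict_equally input_dict chunks (split_dict_equally input_dict chunks)

-- ===== LEMMAS AND PROOFS =====

-- the entries of l (enumerated from position s) that land in bucket j when the
-- round-robin counter starts at idx
def pvSel (chunks : Int) (l : List (String × Int)) (s idx j : Int) : List (String × Int) :=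
  ((PySem.List.enumerate l s).filter (fun p => PySem.Int.mod (idx + p.1) chunks == j)).map Prod.snd

theorem pvSel_nil (chunks s idx j : Int) : pvSel chunks [] s idx j = [] := rfl

theorem pvSel_cons' (chunks : Int) (k : String) (v : Int) (t : List (String × Int)) (s idx j : Int) :
    pvSel chunks ((k, v) :: t) s idx j =
      (if (PySem.Int.mod (idx + s) chunks == j) = true then [(k, v)] else []) ++ pvSel chunks t (s + 1) idx j := by
  simp only [pvSel, PySem.List.enumerate, List.filter_cons]
  by_cases h : (PySem.Int.mod (idx + s) chunks == j) = true
  · simp [h]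
  · simp [h]

theorem pvSel_shift (chunks : Int) (l : List (String × Int)) (s idx j : Int) :
    pvSel chunks l s idx j = pvSel chunks l 0 (idx + s) j := by
  induction l generalizing s idx with
  | nil => rfl
  | cons x t ih =>
      obtain ⟨k, v⟩ := x
      rw [pvSel_cons', pvSel_cons', ih (s + 1) idx, ih (0 + 1) (idx + s)]
      have e1 : idx + s + 0 = idx + s := by ring
      have e2 : idx + (s + 1) = idx + s + (0 + 1) := by ring
      rw [e1, e2]

theorem pvSel_congr (chunks : Int) (l : List (String × Int)) (s j : Int) {a b : Int}
    (h : ∀ p : Int, PySem.Int.mod (a + p) chunks = PySem.Int.mod (b + p) chunks) :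
    pvSel chunks l s a j = pvSel chunks l s b j := by
  induction l generalizing s with
  | nil => rfl
  | cons x t ih =>
      obtain ⟨k, v⟩ := x
      rw [pvSel_cons', pvSel_cons', h s, ih (s + 1)]

theorem pvSel_cons (chunks : Int) (k : String) (v : Int) (t : List (String × Int)) (idx j : Int) :
    pvSel chunks ((k, v) :: t) 0 idx j =
      (if (PySem.Int.mod idx chunks == j) = true then [(k, v)] else []) ++ pvSel chunks t 0 (idx + 1) j := by
  rw [pvSel_cons', pvSel_shift chunks t (0 + 1) idx j]
  have e1 : idx + 0 = idx := by ring
  have e2 : idx + (0 + 1) = idx + 1 := by ring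
  rw [e1, e2]

-- the A-side loop
def pvLoopA (chunks : Int) (l : List (String × Int))
    (st : List (PySem.Dict String Int) × Int) : List (PySem.Dict String Int) × Int :=
  l.foldl
    (fun (st : List (PySem.Dict String Int) × Int) kv =>
      (st.1.modify st.2.toNat (fun d => d.insert kv.1 kv.2),
       if st.2 < chunks - 1 then st.2 + 1 else 0)) st

theorem pvLoopA_inv (chunks : Int) (hc : 1 ≤ chunks) (l : List (String × Int))
    (rl : List (PySem.Dict String Int)) (idx : Int)
    (hidx0 : 0 ≤ idx) (hidx1 : idx < chunks) (hlen : rl.length = chunks.toNat)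
    (hnd : (l.map Prod.fst).Nodup)
    (hfresh : ∀ d ∈ rl, ∀ kv ∈ l, d.contains kv.1 = false) :
    (pvLoopA chunks l (rl, idx)).1 =
      rl.mapIdx (fun j d => PySem.Dict.mk (d.items ++ pvSel chunks l 0 idx (j : Int))) := by
  induction l generalizing rl idx with
  | nil =>
      apply List.ext_getElem
      · simp [pvLoopA]
      · intro i h1 h2
        simp [pvLoopA, List.getElem_mapIdx, pvSel_nil]
  | cons kv t ih =>
      obtain ⟨k, v⟩ := kv
      have hN : idx.toNat < rl.length := by rw [hlen]; omega
      have hstep : pvLoopA chunks ((k, v) :: t) (rl, idx) =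
          pvLoopA chunks t (rl.modify idx.toNat (fun d => d.insert k v),
            if idx < chunks - 1 then idx + 1 else 0) := rfl
      rw [hstep]
      have hnd' : (t.map Prod.fst).Nodup := by
        simp only [List.map_cons, List.nodup_cons] at hnd; exact hnd.2
      have hkt : k ∉ t.map Prod.fst := by
        simp only [List.map_cons, List.nodup_cons] at hnd; exact hnd.1
      have hfresh' : ∀ d ∈ rl.modify idx.toNat (fun d => d.insert k v),
          ∀ kv' ∈ t, d.contains kv'.1 = false := by
        intro d hd kv' hkv'
        rw [List.mem_iff_getElem] at hd
        obtain ⟨i, hi, hdi⟩ := hd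
        have hi' : i < rl.length := by simpa using hi
        rw [List.getElem_modify] at hdi
        have hne : ¬ (kv'.1 = k) := by
          intro hh
          exact hkt (hh ▸ List.mem_map_of_mem hkv')
        by_cases he : idx.toNat = i
        · rw [if_pos he] at hdi
          rw [← hdi, PySem.Dict.contains_insert]
          have h1 : (kv'.1 == k) = false := by
            simpa using hne
          have h2 : rl[i].contains kv'.1 = false :=
            hfresh rl[i] (List.getElem_mem _) kv' (List.mem_cons_of_mem _ hkv')
          simp [h1, h2]
        · rw [if_neg he] at hdi
          exact hdi ▸ hfresh rl[i] (List.getElem_mem _) kv' (List.mem_cons_of_mem _ hkv')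
      have hidx'0 : 0 ≤ (if idx < chunks - 1 then idx + 1 else 0) := by split <;> omega
      have hidx'1 : (if idx < chunks - 1 then idx + 1 else 0) < chunks := by split <;> omega
      rw [ih (rl.modify idx.toNat (fun d => d.insert k v))
            (if idx < chunks - 1 then idx + 1 else 0) hidx'0 hidx'1
            (by rw [List.length_modify]; exact hlen) hnd' hfresh']
      have hcong : ∀ j : Int, pvSel chunks t 0 (idx + 1) j =
          pvSel chunks t 0 (if idx < chunks - 1 then idx + 1 else 0) j := by
        intro j
        apply pvSel_congr
        intro p
        by_cases hlt : idx < chunks - 1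
        · rw [if_pos hlt]
        · rw [if_neg hlt]
          have hidx : idx = chunks - 1 := by omega
          subst hidx
          rw [PySem.Int.mod_eq_emod_of_pos (by omega), PySem.Int.mod_eq_emod_of_pos (by omega)]
          have h3 : chunks - 1 + 1 + p = p + chunks := by ring
          rw [h3, Int.add_emod_right, zero_add]
      apply List.ext_getElem
      · simp
      · intro i h1 h2
        rw [List.getElem_mapIdx, List.getElem_mapIdx, List.getElem_modify, pvSel_cons]
        have hmod : PySem.Int.mod idx chunks = idx := by
          rw [PySem.Int.mod_eq_emod_of_pos (by omega)]
          exact Int.emod_eq_of_lt hidx0 hidx1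
        rw [hmod, ← hcong ((i : Nat) : Int)]
        by_cases he : idx.toNat = i
        · rw [if_pos he]
          have hcast : ((i : Nat) : Int) = idx := by omega
          have hcontains : rl[i].contains k = false :=
            hfresh rl[i] (List.getElem_mem _) (k, v) List.mem_cons_self
          rw [PySem.Dict.items_insert_of_not_contains rl[i] v hcontains]
          simp [hcast]
        · rw [if_neg he]
          have hcast : ¬ (idx = ((i : Nat) : Int)) := by omega
          simp [hcast]

theorem pvEnumerate_map_snd (l : List (String × Int)) (s : Int) :
    (PySem.List.enumerate l s).map Prod.snd = l := by
  induction l generalizing s with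
  | nil => rfl
  | cons x t ih => simp [PySem.List.enumerate, ih]

theorem pvRange_len (chunks : Int) (hc : 1 ≤ chunks) :
    PySem.List.pyRange 0 chunks 1 = List.map (fun k : Nat => (k : Int)) (List.range chunks.toNat) := by
  rw [PySem.List.pyRange_of_pos 0 chunks (by omega)]
  have h1 : (if (0 : Int) < chunks then ((chunks - 0 + 1 - 1) / 1).toNat else 0) = chunks.toNat := by
    rw [if_pos (by omega)]
    have : chunks - 0 + 1 - 1 = chunks := by ring
    rw [this, Int.ediv_one]
  rw [h1]
  apply List.map_congr_left
  intro a _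
  ring

theorem split_dict_equally_spec' (input_dict : List (String × Int)) (chunks : Int)
    (hpre : Pre_split_dict_equally input_dict chunks) :
    split_dict_equally input_dict chunks = split_dict_equally_alt input_dict chunks := by
  obtain ⟨hnd, hco⟩ := hpre
  have hB : split_dict_equally_alt input_dict chunks =
      (PySem.List.pyRange 0 chunks 1).map (fun j =>
        (((PySem.List.enumerate input_dict).filter
            (fun p => PySem.Int.mod p.1 chunks == j)).foldl
            (fun (d : PySem.Dict String Int) p => d.insert p.2.1 p.2.2)
            PySem.Dict.empty).items) := rfl
  have hA : split_dict_equally input_dict chunks =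
      (pvLoopA chunks input_dict
        ((PySem.List.pyRange 0 chunks 1).map (fun _ => PySem.Dict.empty), 0)).1.map
        PySem.Dict.items := rfl
  rcases hco with hc | hl
  · -- chunks ≥ 1
    rw [hA, hB, pvRange_len chunks hc]
    rw [pvLoopA_inv chunks hc input_dict _ 0 le_rfl (by omega)
          (by simp) hnd
          (by intro d hd kv _
              simp only [List.mem_map] at hd
              obtain ⟨_, _, hd⟩ := hd
              rw [← hd]
              exact PySem.Dict.contains_empty kv.1)]
    apply List.ext_getElem
    · simp
    · intro i h1 h2
      simp only [List.getElem_map, List.getElem_mapIdx, List.getElem_range]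
      -- B-side bucket: the fresh-key insert loop appends
      have hsub : ((((PySem.List.enumerate input_dict).filter
            (fun p => PySem.Int.mod p.1 chunks == ((i : Nat) : Int))).map
            (fun p : Int × (String × Int) => p.2.1)).Nodup) := by
        have h4 : (((PySem.List.enumerate input_dict).filter
            (fun p => PySem.Int.mod p.1 chunks == ((i : Nat) : Int))).map
            (fun p : Int × (String × Int) => p.2.1)).Sublist
            (((PySem.List.enumerate input_dict).map
              (fun p : Int × (String × Int) => p.2.1))) :=
          List.Sublist.map _ List.filter_sublist
        have h5 : ((PySem.List.enumerate input_dict).map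
            (fun p : Int × (String × Int) => p.2.1)) = input_dict.map Prod.fst := by
          have h6 := pvEnumerate_map_snd input_dict 0
          calc ((PySem.List.enumerate input_dict).map (fun p : Int × (String × Int) => p.2.1))
              = (((PySem.List.enumerate input_dict).map Prod.snd).map Prod.fst) := by
                rw [List.map_map]
                rfl
            _ = input_dict.map Prod.fst := by rw [h6]
        exact List.Nodup.sublist (h5 ▸ h4) hnd
      rw [PySem.Dict.items_foldl_insert_fresh
            ((PySem.List.enumerate input_dict).filter
              (fun p => PySem.Int.mod p.1 chunks == ((i : Nat) : Int)))
            (fun p : Int × (String × Int) => p.2.1) (fun p : Int × (String × Int) => p.2.2)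
            PySem.Dict.empty (by intro a _; exact PySem.Dict.contains_empty _) hsub]
      simp only [PySem.Dict.empty, List.nil_append, pvSel, zero_add]
  · subst hl
    rw [hA, hB]
    apply List.ext_getElem
    · simp [pvLoopA]
    · intro i h1 h2
      simp [pvLoopA, PySem.List.enumerate, PySem.Dict.empty]

-- ===== VERDICT (by name: the statement is the Claim_ definition above) =====
theorem split_dict_equally_spec : Claim_equal_split_dict_equally := by
  intro input_dict chunks _ hpre
  exact split_dict_equally_spec' input_dict chunks hpre
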